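-- pv_equiv track=rewrite | github.com/dmarek03/ALGORITHM_AND_DATA_STRUCTURE | offline_asd/zad2_snow/zad2.py | get_max_sum2
-- ===== SOURCE A (Python) =====
-- def get_max_sum2(array):
--     n = len(array)
--     sorted_array = [0]*n
--     range_max = max(array)
--     range_min = min(array)
--     interval = range_max - range_min + 1
--     count_tab = [0]*interval
--
--     for i in range(n):
--         count_tab[array[i]-range_min] += 1
--
--     for j in range(1, len(count_tab)):
--         count_tab[j] += count_tab[j-1]
--     sum1 = 0
--     for k in range(n-1, -1, -1):
--         sorted_array[count_tab[array[k]-range_min]-1] = array[k]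
--         count_tab[array[k] - range_min] -= 1
--
--     for i in range(n):
--         if sorted_array[n-i-1] - i > 0:
--             sum1 += sorted_array[n-i-1] - i
--         else:
--             break
--     return sum1
-- ===== SOURCE B (Python) =====
-- def get_max_sum2(array):
--     range_max = max(array)
--     range_min = min(array)
--     count_tab = [0] * (range_max - range_min + 1)
--     for x in array:
--         count_tab[x - range_min] += 1
--     total = 0
--     rank = 0
--     for v in range(range_max, range_min - 1, -1):
--         for _ in range(count_tab[v - range_min]):
--             if v - rank > 0:
--                 total += v - rank
--                 rank += 1
--             else:
--                 return total
--     return total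
-- ===== Notes on version B (the rewrite author's own statement) =====
-- stated objective: simpler
-- what changed: B keeps the histogram but drops A's prefix-sum and scatter-into-a-sorted-array passes entirely: it walks the bucket values from max down to min with a rank counter, adding v-rank while positive, so no sorted array is ever materialised.
-- outside the precondition, e.g. on get_max_sum2([]): A raises ValueError, B raises ValueError
import Mathlib
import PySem

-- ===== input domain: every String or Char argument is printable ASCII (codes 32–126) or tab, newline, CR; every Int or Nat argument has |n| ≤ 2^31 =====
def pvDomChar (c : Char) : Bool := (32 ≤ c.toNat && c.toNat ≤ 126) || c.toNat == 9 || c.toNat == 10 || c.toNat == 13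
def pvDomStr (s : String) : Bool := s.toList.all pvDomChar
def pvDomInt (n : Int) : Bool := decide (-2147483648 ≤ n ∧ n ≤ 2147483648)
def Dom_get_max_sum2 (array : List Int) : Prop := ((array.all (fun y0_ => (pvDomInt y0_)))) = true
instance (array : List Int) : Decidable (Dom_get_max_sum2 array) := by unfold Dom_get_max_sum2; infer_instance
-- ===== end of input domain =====

-- B replaces A's prefix-sum + scatter-into-a-sorted-array steps by a direct descending walk over
-- the histogram with a rank counter (objective: simpler — no sorted array is ever materialised).

-- Python list read/write at a non-negative in-range index (every index in both ports is such
-- on the inputs admitted by Pre_): exact there, so the ports are faithful on Pre_.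
def getA (a : Array Int) (i : Nat) : Int := a[i]?.getD 0
def setA (a : Array Int) (i : Nat) (v : Int) : Array Int := a.setIfInBounds i v

-- ===== PORT A =====
-- for i in range(n): count_tab[array[i]-range_min] += 1
def aCountStep (m : Int) (ct : Array Int) (x : Int) : Array Int :=
  setA ct (x - m).toNat (getA ct (x - m).toNat + 1)
-- for j in range(1, len(count_tab)): count_tab[j] += count_tab[j-1]
def aPrefixStep (c : Array Int) (j : Nat) : Array Int :=
  setA c j (getA c j + getA c (j - 1))
-- body of: for k in range(n-1, -1, -1) — reads array[k], i.e. the elements of array in reverse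
def aScatterStep (m : Int) (st : Array Int × Array Int) (x : Int) : Array Int × Array Int :=
  (setA st.1 (getA st.2 (x - m).toNat - 1).toNat x,
   setA st.2 (x - m).toNat (getA st.2 (x - m).toNat - 1))
-- for i in range(n): if sorted_array[n-i-1] - i > 0: sum1 += … else: break
def aScan (sorted : Array Int) (n : Nat) : Nat → Nat → Int → Int
  | 0, _, s => s
  | fuel+1, i, s =>
      if getA sorted (n - i - 1) - (i : Int) > 0
      then aScan sorted n fuel (i+1) (s + (getA sorted (n - i - 1) - (i : Int)))
      else s

def get_max_sum2 (array : List Int) : Int :=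
  let n := array.length
  let range_max := (PySem.List.max? array id).getD 0
  let range_min := (PySem.List.min? array id).getD 0
  let interval := range_max - range_min + 1
  let count1 := array.foldl (aCountStep range_min) (Array.replicate interval.toNat 0)
  let count2 := (List.range' 1 (count1.size - 1)).foldl aPrefixStep count1
  let st := array.reverse.foldl (aScatterStep range_min) (Array.replicate n 0, count2)
  aScan st.1 n n 0 0

-- ===== PORT B =====
-- for x in array: count_tab[x - range_min] += 1
def bCountStep (m : Int) (ct : Array Int) (x : Int) : Array Int :=
  setA ct (x - m).toNat (getA ct (x - m).toNat + 1)
-- for _ in range(count_tab[v-range_min]): if v - rank > 0: … else: return total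
-- result: ((total, rank), stopped-by-return?)
def bInner (v : Int) : Nat → Int × Int → (Int × Int) × Bool
  | 0, tr => (tr, false)
  | c+1, (t, r) => if v - r > 0 then bInner v c (t + (v - r), r + 1) else ((t, r), true)
-- for v in range(range_max, range_min - 1, -1): …
def bOuter (ct : Array Int) (m : Int) : List Int → Int × Int → Int
  | [], tr => tr.1
  | v :: vs, tr =>
      match bInner v (getA ct (v - m).toNat).toNat tr with
      | (tr', true) => tr'.1
      | (tr', false) => bOuter ct m vs tr'

def get_max_sum2_alt (array : List Int) : Int :=
  let range_max := (PySem.List.max? array id).getD 0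
  let range_min := (PySem.List.min? array id).getD 0
  let ct := array.foldl (bCountStep range_min) (Array.replicate (range_max - range_min + 1).toNat 0)
  bOuter ct range_min (PySem.List.pyRange range_max (range_min - 1) (-1)) (0, 0)

-- ===== PRECONDITION & SPEC =====
-- Python A raises ValueError (max of an empty sequence) on []; B raises there too.
def Pre_get_max_sum2 (array : List Int) : Prop := array ≠ []
instance (array : List Int) : Decidable (Pre_get_max_sum2 array) := by unfold Pre_get_max_sum2; infer_instance
def pvWitness_get_max_sum2 : List Int := [3, 1, 4, 1, 5]

def Spec_get_max_sum2 (array : List Int) (out : Int) : Prop := out = get_max_sum2_alt array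
instance (array : List Int) (out : Int) : Decidable (Spec_get_max_sum2 array out) := by unfold Spec_get_max_sum2; infer_instance

-- ===== CLAIM (what is proved, stated in full; the proofs are below) =====
def Claim_equal_get_max_sum2 : Prop := ∀ (array : List Int), Dom_get_max_sum2 array → Pre_get_max_sum2 array → Spec_get_max_sum2 array (get_max_sum2 array)

-- ===== LEMMAS AND PROOFS =====

-- list-level mirrors of the ports' loops (proof helpers; bridged to the Array code below)
def getN (l : List Int) (i : Nat) : Int := l.getD i 0
def setN (l : List Int) (i : Nat) (v : Int) : List Int := l.set i v

def aCountStepL (m : Int) (ct : List Int) (x : Int) : List Int :=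
  setN ct (x - m).toNat (getN ct (x - m).toNat + 1)
def aPrefixStepL (c : List Int) (j : Nat) : List Int :=
  setN c j (getN c j + getN c (j - 1))
def aScatterStepL (m : Int) (st : List Int × List Int) (x : Int) : List Int × List Int :=
  (setN st.1 (getN st.2 (x - m).toNat - 1).toNat x,
   setN st.2 (x - m).toNat (getN st.2 (x - m).toNat - 1))
def aScanL (sorted : List Int) (n : Nat) : Nat → Nat → Int → Int
  | 0, _, s => s
  | fuel+1, i, s =>
      if getN sorted (n - i - 1) - (i : Int) > 0
      then aScanL sorted n fuel (i+1) (s + (getN sorted (n - i - 1) - (i : Int)))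
      else s
def bOuterL (ct : List Int) (m : Int) : List Int → Int × Int → Int
  | [], tr => tr.1
  | v :: vs, tr =>
      match bInner v (getN ct (v - m).toNat).toNat tr with
      | (tr', true) => tr'.1
      | (tr', false) => bOuterL ct m vs tr'

-- bridges: Array code ↔ list mirrors
theorem getA_toList (a : Array Int) (i : Nat) : getA a i = getN a.toList i := by
  simp [getA, getN, List.getD_eq_getElem?_getD, Array.getElem?_toList]

theorem setA_toList (a : Array Int) (i : Nat) (v : Int) :
    (setA a i v).toList = setN a.toList i v := by
  simp [setA, setN, Array.toList_setIfInBounds]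

theorem countFold_toList (m : Int) (l : List Int) : ∀ (a : Array Int),
    (l.foldl (aCountStep m) a).toList = l.foldl (aCountStepL m) a.toList := by
  induction l with
  | nil => intro a; rfl
  | cons x xs ih =>
      intro a
      simp only [List.foldl_cons, ih]
      congr 1
      rw [aCountStep, aCountStepL, setA_toList, getA_toList]

theorem prefixFold_toList (l : List Nat) : ∀ (a : Array Int),
    (l.foldl aPrefixStep a).toList = l.foldl aPrefixStepL a.toList := by
  induction l with
  | nil => intro a; rfl
  | cons j js ih =>
      intro a
      simp only [List.foldl_cons, ih]
      congr 1
      rw [aPrefixStep, aPrefixStepL, setA_toList, getA_toList, getA_toList]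

theorem scatterFold_toList (m : Int) (l : List Int) : ∀ (st : Array Int × Array Int),
    ((l.foldl (aScatterStep m) st).1.toList, (l.foldl (aScatterStep m) st).2.toList)
      = l.foldl (aScatterStepL m) (st.1.toList, st.2.toList) := by
  induction l with
  | nil => intro st; rfl
  | cons x xs ih =>
      intro st
      simp only [List.foldl_cons, ih]
      congr 1
      rw [aScatterStep, aScatterStepL]
      simp only [setA_toList, getA_toList]

theorem aScan_toList (sorted : Array Int) (n : Nat) : ∀ (fuel i : Nat) (s : Int),
    aScan sorted n fuel i s = aScanL sorted.toList n fuel i s := by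
  intro fuel
  induction fuel with
  | zero => intro i s; rfl
  | succ fuel ih =>
      intro i s
      simp only [aScan, aScanL, getA_toList, ih]

theorem bOuter_toList (ct : Array Int) (m : Int) : ∀ (vs : List Int) (tr : Int × Int),
    bOuter ct m vs tr = bOuterL ct.toList m vs tr := by
  intro vs
  induction vs with
  | nil => intro tr; rfl
  | cons v vs ih =>
      intro tr
      simp only [bOuter, bOuterL, getA_toList]
      rcases h : bInner v (getN ct.toList (v - m).toNat).toNat tr with ⟨p, b⟩
      cases b <;> simp [ih]


-- getN / setN basics
theorem length_setN (l : List Int) (i : Nat) (v : Int) : (setN l i v).length = l.length :=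
  List.length_set

theorem getN_setN_self (l : List Int) (i : Nat) (v : Int) (h : i < l.length) :
    getN (setN l i v) i = v := by
  simp [getN, setN, List.getD_eq_getElem?_getD, h]

theorem getN_setN_ne (l : List Int) (i k : Nat) (v : Int) (h : i ≠ k) :
    getN (setN l i v) k = getN l k := by
  simp [getN, setN, List.getD_eq_getElem?_getD, h]

theorem getN_replicate (n j : Nat) (h : j < n) : getN (List.replicate n (0:Int)) j = 0 := by
  unfold getN; exact List.getD_replicate _ h

-- partial sums of the histogram of arr shifted by m: S arr m j = Σ_{t<j} (count of m+t in arr)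
def S (arr : List Int) (m : Int) : Nat → Int
  | 0 => 0
  | j+1 => S arr m j + (arr.count (m + j) : Int)

theorem S_mono (arr : List Int) (m : Int) {j k : Nat} (h : j ≤ k) : S arr m j ≤ S arr m k := by
  induction k with
  | zero => simp_all
  | succ k ih =>
      rcases Nat.eq_or_lt_of_le h with rfl | h'
      · exact le_refl _
      · have := ih (Nat.lt_succ_iff.mp h')
        have : S arr m j ≤ S arr m k := this
        simp only [S]
        have hc : (0:Int) ≤ (arr.count (m + k) : Int) := by positivity
        omega

theorem S_nonneg (arr : List Int) (m : Int) (j : Nat) : 0 ≤ S arr m j :=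
  S_mono arr m (Nat.zero_le j)

theorem S_cons (x : Int) (arr : List Int) (m : Int) (j : Nat) :
    S (x :: arr) m j = S arr m j + (if 0 ≤ x - m ∧ x - m < (j:Int) then 1 else 0) := by
  induction j with
  | zero => simp [S]
  | succ j ih =>
      simp only [S, ih, List.count_cons]
      by_cases hx : x = m + (j:Int)
      · have h1 : ¬ (0 ≤ x - m ∧ x - m < (j:Int)) := by omega
        have hbe : (x == m + (j:Int)) = true := beq_iff_eq.mpr hx
        rw [hbe, if_pos rfl, if_neg h1, if_pos (by push_cast; omega)]
        push_cast
        ring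
      · have hbe : (x == m + (j:Int)) = false := beq_eq_false_iff_ne.mpr hx
        rw [hbe]
        simp only [Bool.false_eq_true, if_false, Nat.add_zero]
        have hne : x - m ≠ (j:Int) := by omega
        have hiff : (if 0 ≤ x - m ∧ x - m < ((j:Nat):Int) then (1:Int) else 0)
            = (if 0 ≤ x - m ∧ x - m < (((j+1:Nat)):Int) then (1:Int) else 0) := by
          push_cast
          split_ifs with ha hc <;> first | rfl | omega
        rw [hiff]
        push_cast
        ring

theorem S_len (arr : List Int) (m : Int) (K : Nat)
    (hb : ∀ x ∈ arr, 0 ≤ x - m ∧ x - m < (K:Int)) :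
    S arr m K = (arr.length : Int) := by
  induction arr with
  | nil =>
      have : ∀ j, S ([] : List Int) m j = 0 := by
        intro j; induction j with
        | zero => rfl
        | succ j ih => simp [S, ih]
      simp [this]
  | cons x xs ih =>
      have hx := hb x (by simp)
      rw [S_cons, ih (fun y hy => hb y (by simp [hy])), if_pos hx]
      simp only [List.length_cons]
      push_cast
      ring

theorem S_cover (arr : List Int) (m : Int) (K : Nat) (p : Nat) (h : (p:Int) < S arr m K) :
    ∃ j, j < K ∧ S arr m j ≤ (p:Int) ∧ (p:Int) < S arr m (j+1) := by
  induction K with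
  | zero => simp [S] at h; omega
  | succ K ih =>
      rcases lt_or_ge (p:Int) (S arr m K) with h' | h'
      · obtain ⟨j, hj, h1, h2⟩ := ih h'
        exact ⟨j, Nat.lt_succ_of_lt hj, h1, h2⟩
      · exact ⟨K, Nat.lt_succ_self K, h', h⟩

-- histogram loop
theorem hist_len (m : Int) (arr ct : List Int) :
    (arr.foldl (aCountStepL m) ct).length = ct.length := by
  induction arr generalizing ct with
  | nil => rfl
  | cons x xs ih => simp [List.foldl_cons, ih, aCountStepL, length_setN]

theorem hist (m : Int) (arr : List Int) : ∀ (ct : List Int),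
    (∀ x ∈ arr, 0 ≤ x - m ∧ (x - m).toNat < ct.length) →
    ∀ j, j < ct.length →
      getN (arr.foldl (aCountStepL m) ct) j = getN ct j + (arr.count (m + j) : Int) := by
  induction arr with
  | nil => intro ct _ j hj; simp
  | cons x xs ih =>
      intro ct hb j hj
      have hx := hb x (by simp)
      simp only [List.foldl_cons]
      rw [ih (aCountStepL m ct x)
          (by intro y hy; have := hb y (by simp [hy]); simpa [aCountStepL, length_setN] using this)
          j (by simpa [aCountStepL, length_setN] using hj)]
      rw [List.count_cons]
      by_cases hjx : j = (x - m).toNat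
      · subst hjx
        rw [aCountStepL, getN_setN_self _ _ _ hj]
        have hbe : (x == m + ((x - m).toNat : Int)) = true := beq_iff_eq.mpr (by omega)
        rw [hbe, if_pos rfl]
        push_cast; ring
      · rw [aCountStepL, getN_setN_ne _ _ _ _ (fun h => hjx h.symm)]
        have hbe : (x == m + (j:Int)) = false := beq_eq_false_iff_ne.mpr (by omega)
        rw [hbe]
        simp only [Bool.false_eq_true, if_false, Nat.add_zero]

-- prefix-sum loop
theorem prefix_len (c : List Int) (l : List Nat) :
    (l.foldl aPrefixStepL c).length = c.length := by
  induction l generalizing c with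
  | nil => rfl
  | cons j js ih => simp [List.foldl_cons, ih, aPrefixStepL, length_setN]

theorem prefix_aux (f F : Nat → Int) (hFs : ∀ j, 1 ≤ j → F j = F (j-1) + f j) :
    ∀ (cnt i : Nat) (c : List Int), 1 ≤ i → i + cnt = c.length →
    (∀ j, j < i → getN c j = F j) → (∀ j, i ≤ j → j < c.length → getN c j = f j) →
    ∀ j, j < c.length → getN ((List.range' i cnt).foldl aPrefixStepL c) j = F j := by
  intro cnt
  induction cnt with
  | zero =>
      intro i c _ hlen hF _ j hj
      simp only [List.range'_zero, List.foldl_nil]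
      exact hF j (by omega)
  | succ cnt ih =>
      intro i c hi hlen hF hf j hj
      rw [List.range'_succ, List.foldl_cons]
      have hiC : i < c.length := by omega
      have hstep : ∀ j, j < i + 1 → getN (aPrefixStepL c i) j = F j := by
        intro j hj'
        by_cases hji : j = i
        · subst hji
          rw [aPrefixStepL, getN_setN_self _ _ _ hiC]
          rw [hf j (le_refl _) hiC, hF (j-1) (by omega), hFs j hi]
          ring
        · rw [aPrefixStepL, getN_setN_ne _ _ _ _ (fun h => hji h.symm)]
          exact hF j (by omega)
      have hrest : ∀ j, i + 1 ≤ j → j < (aPrefixStepL c i).length → getN (aPrefixStepL c i) j = f j := by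
        intro j h1 h2
        rw [aPrefixStepL, getN_setN_ne _ _ _ _ (by omega)]
        exact hf j (by omega) (by simpa [aPrefixStepL, length_setN] using h2)
      exact ih (i+1) (aPrefixStepL c i) (by omega)
        (by simp [aPrefixStepL, length_setN]; omega) hstep hrest j
        (by simpa [aPrefixStepL, length_setN] using hj)

-- scatter loop invariant
def ScatInv (arr : List Int) (m : Int) (K n : Nat) (done : List Int) (st : List Int × List Int) : Prop :=
  st.1.length = n ∧ st.2.length = K ∧
  (∀ j, j < K → getN st.2 j = S arr m (j+1) - (done.count (m + j) : Int)) ∧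
  (∀ p j, p < n → j < K →
    S arr m (j+1) - (done.count (m + j) : Int) ≤ (p:Int) → (p:Int) < S arr m (j+1) →
    getN st.1 p = m + j)

theorem scatter_step (arr : List Int) (m : Int) (K n : Nat)
    (hb : ∀ x ∈ arr, 0 ≤ x - m ∧ (x - m).toNat < K)
    (hSK : S arr m K ≤ (n:Int))
    (done : List Int) (x : Int) (hx : x ∈ arr)
    (hcnt : done.count x < arr.count x)
    (hsub : ∀ v : Int, done.count v ≤ arr.count v)
    (st : List Int × List Int) (hInv : ScatInv arr m K n done st) :
    ScatInv arr m K n (done ++ [x]) (aScatterStepL m st x) := by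
  obtain ⟨sorted, ct⟩ := st
  obtain ⟨h1, h2, h3, h4⟩ := hInv
  replace h1 : sorted.length = n := h1
  replace h2 : ct.length = K := h2
  replace h3 : ∀ j, j < K → getN ct j = S arr m (j+1) - ((done.count (m + (j:Int))) : Int) := h3
  replace h4 : ∀ p j, p < n → j < K →
      S arr m (j+1) - ((done.count (m + (j:Int))) : Int) ≤ (p:Int) → (p:Int) < S arr m (j+1) →
      getN sorted p = m + j := h4
  obtain ⟨hx0, hxK⟩ := hb x hx
  have hxval : x = m + ((x - m).toNat : Int) := by omega
  have hcx := h3 (x - m).toNat hxK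
  rw [← hxval] at hcx
  have hSsucc : S arr m ((x - m).toNat + 1) = S arr m (x - m).toNat + (arr.count (m + ((x - m).toNat : Int)) : Int) := rfl
  rw [← hxval] at hSsucc
  have hS0 : 0 ≤ S arr m (x - m).toNat := S_nonneg arr m (x - m).toNat
  have hSle : S arr m ((x - m).toNat + 1) ≤ S arr m K := S_mono arr m hxK
  -- the slot written this step
  have hlow : S arr m (x - m).toNat ≤ getN ct (x - m).toNat - 1 := by
    rw [hcx, hSsucc]; omega
  have hhigh : getN ct (x - m).toNat - 1 < S arr m ((x - m).toNat + 1) := by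
    rw [hcx]; omega
  have hp0n : getN ct (x - m).toNat - 1 < (n : Int) := by omega
  have hp0cast : (((getN ct (x - m).toNat - 1).toNat : Int)) = getN ct (x - m).toNat - 1 := by omega
  -- the new count list
  have hct' : ∀ j, j < K →
      getN (setN ct (x - m).toNat (getN ct (x - m).toNat - 1)) j
        = S arr m (j+1) - ((done ++ [x]).count (m + (j:Int)) : Int) := by
    intro j hj
    by_cases hjx : j = (x - m).toNat
    · subst hjx
      rw [getN_setN_self _ _ _ (by omega)]
      rw [← hxval]
      have hgx : (done ++ [x]).count x = done.count x + 1 := by simp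
      rw [hgx, hcx]
      push_cast
      ring
    · rw [getN_setN_ne _ _ _ _ (fun h => hjx h.symm)]
      rw [List.count_append, List.count_singleton]
      have hbe : (x == m + (j:Int)) = false := beq_eq_false_iff_ne.mpr (by omega)
      rw [hbe]
      simp only [Bool.false_eq_true, if_false, Nat.add_zero]
      rw [h3 j hj]
  -- the new sorted list
  have hsorted' : ∀ p j, p < n → j < K →
      S arr m (j+1) - ((done ++ [x]).count (m + (j:Int)) : Int) ≤ (p:Int) →
      (p:Int) < S arr m (j+1) →
      getN (setN sorted (getN ct (x - m).toNat - 1).toNat x) p = m + j := by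
    intro p j hpn hj hge hlt
    by_cases hjx : j = (x - m).toNat
    · subst hjx
      rw [← hxval] at hge
      have hgx : (done ++ [x]).count x = done.count x + 1 := by simp
      rw [hgx] at hge
      push_cast at hge
      by_cases hp0 : (p:Int) = getN ct (x - m).toNat - 1
      · have hpeq : p = (getN ct (x - m).toNat - 1).toNat := by omega
        subst hpeq
        rw [getN_setN_self _ _ _ (by omega)]
        omega
      · rw [getN_setN_ne _ _ _ _ (by omega)]
        refine h4 p (x - m).toNat hpn hj ?_ hlt
        rw [← hxval]
        omega
    · -- a slot of a different value's block: untouched this step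
      have hcnt2 : (done.count (m + (j:Int)) : Int) ≤ (arr.count (m + (j:Int)) : Int) := by
        exact_mod_cast hsub (m + (j:Int))
      have hSsj : S arr m (j+1) = S arr m j + (arr.count (m + (j:Int)) : Int) := rfl
      have hbe : (x == m + (j:Int)) = false := beq_eq_false_iff_ne.mpr (by omega)
      rw [List.count_append, List.count_singleton, hbe] at hge
      simp only [Bool.false_eq_true, if_false, Nat.add_zero] at hge
      have hblk : S arr m j ≤ (p:Int) := by omega
      have hdisj : (p:Int) ≠ getN ct (x - m).toNat - 1 := by
        rcases Nat.lt_or_ge j (x - m).toNat with hlt' | hge'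
        · have : S arr m (j+1) ≤ S arr m (x - m).toNat := S_mono arr m hlt'
          omega
        · have hgt : (x - m).toNat + 1 ≤ j := by omega
          have : S arr m ((x - m).toNat + 1) ≤ S arr m j := S_mono arr m hgt
          omega
      rw [getN_setN_ne _ _ _ _ (by omega)]
      exact h4 p j hpn hj hge hlt
  exact ⟨by simpa [aScatterStepL, setN] using h1,
         by simpa [aScatterStepL, setN] using h2,
         fun j hj => by simpa [aScatterStepL] using hct' j hj,
         fun p j hpn hj hge hlt => by
           simpa [aScatterStepL] using hsorted' p j hpn hj hge hlt⟩

theorem scatter_aux (arr : List Int) (m : Int) (K n : Nat)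
    (hb : ∀ x ∈ arr, 0 ≤ x - m ∧ (x - m).toNat < K)
    (hSK : S arr m K ≤ (n:Int)) :
    ∀ (rem done : List Int) (st : List Int × List Int),
      done ++ rem = arr.reverse → ScatInv arr m K n done st →
      ScatInv arr m K n (done ++ rem) (rem.foldl (aScatterStepL m) st) := by
  intro rem
  induction rem with
  | nil => intro done st _ h; simpa using h
  | cons x xs ih =>
      intro done st heq hInv
      have hx : x ∈ arr := by
        have : x ∈ arr.reverse := by rw [← heq]; simp
        simpa using this
      have hcnt : done.count x < arr.count x := by
        have : arr.reverse.count x = done.count x + (x :: xs).count x := by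
          rw [← heq, List.count_append]
        rw [List.count_reverse] at this
        have hx1 : (x :: xs).count x ≥ 1 := by simp
        omega
      have hsub : ∀ v : Int, done.count v ≤ arr.count v := by
        intro v
        have : arr.reverse.count v = done.count v + (x :: xs).count v := by
          rw [← heq, List.count_append]
        rw [List.count_reverse] at this
        omega
      have := ih (done ++ [x]) (aScatterStepL m st x)
        (by simpa using heq)
        (scatter_step arr m K n hb hSK done x hx hcnt hsub st hInv)
      simpa using this
  
-- ascending expansion of the histogram
def ascL (arr : List Int) (m : Int) (K : Nat) : List Int :=
  (List.range K).flatMap (fun j : Nat => List.replicate (arr.count (m + (j:Int))) (m + (j:Int)))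

theorem asc_len (arr : List Int) (m : Int) (K : Nat) :
    ((ascL arr m K).length : Int) = S arr m K := by
  induction K with
  | zero => simp [ascL, S]
  | succ K ih =>
      simp only [ascL, List.range_succ, List.flatMap_append, List.length_append] at *
      simp only [S, ← ih]
      push_cast
      simp

theorem asc_split (arr : List Int) (m : Int) (K : Nat) :
    ascL arr m (K+1) = ascL arr m K ++ List.replicate (arr.count (m + K)) (m + (K:Int)) := by
  simp [ascL, List.range_succ]

theorem asc_get (arr : List Int) (m : Int) (K : Nat) :
    ∀ j, j < K → ∀ p : Nat, S arr m j ≤ (p:Int) → (p:Int) < S arr m (j+1) →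
      getN (ascL arr m K) p = m + j := by
  induction K with
  | zero => intro j hj; omega
  | succ K ih =>
      intro j hj p h1 h2
      have hlen : ((ascL arr m K).length : Int) = S arr m K := asc_len arr m K
      rw [asc_split]
      rcases Nat.lt_succ_iff_lt_or_eq.mp hj with hj' | hjK
      · have hp : (p:Int) < S arr m K := lt_of_lt_of_le h2 (S_mono arr m hj')
        rw [getN, List.getD_append _ _ _ _ (by omega)]
        exact ih j hj' p h1 h2
      · subst hjK
        have hple : (ascL arr m j).length ≤ p := by omega
        rw [getN, List.getD_append_right _ _ _ _ hple]
        have h2' := h2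
        simp only [S] at h2'
        rw [List.getD_replicate _ (by omega)]

-- scan with break, over an explicit list
def scanS : List Int → Int × Int → (Int × Int) × Bool
  | [], tr => (tr, false)
  | x :: xs, (t, r) => if x - r > 0 then scanS xs (t + (x - r), r + 1) else ((t, r), true)

theorem scanS_append (l1 l2 : List Int) (tr : Int × Int) :
    scanS (l1 ++ l2) tr =
      match scanS l1 tr with
      | (p, true) => (p, true)
      | (p, false) => scanS l2 p := by
  induction l1 generalizing tr with
  | nil => simp [scanS]
  | cons x xs ih =>
      obtain ⟨t, r⟩ := tr
      simp only [List.cons_append, scanS]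
      split_ifs with h
      · exact ih _
      · rfl

theorem bInner_eq (v : Int) (c : Nat) : ∀ tr, bInner v c tr = scanS (List.replicate c v) tr := by
  induction c with
  | zero => intro tr; simp [bInner, scanS]
  | succ c ih =>
      intro ⟨t, r⟩
      simp only [List.replicate_succ, bInner, scanS]
      split_ifs with h
      · exact ih _
      · rfl

theorem bOuterL_eq (ct : List Int) (m : Int) :
    ∀ (vs : List Int) (tr : Int × Int),
      bOuterL ct m vs tr =
        (scanS (vs.flatMap (fun v => List.replicate (getN ct (v - m).toNat).toNat v)) tr).1.1 := by
  intro vs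
  induction vs with
  | nil => intro tr; simp [bOuterL, scanS]
  | cons v vs ih =>
      intro tr
      rw [List.flatMap_cons, scanS_append]
      simp only [bOuterL, bInner_eq]
      rcases h : scanS (List.replicate (getN ct (v - m).toNat).toNat v) tr with ⟨p, b⟩
      cases b
      · simpa using ih p
      · rfl

theorem aScanL_eq (sorted : List Int) (n : Nat) (hlen : sorted.length = n) :
    ∀ (fuel i : Nat) (s : Int), i + fuel = n →
      aScanL sorted n fuel i s = (scanS (sorted.reverse.drop i) (s, (i:Int))).1.1 := by
  intro fuel
  induction fuel with
  | zero =>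
      intro i s hin
      have : sorted.reverse.drop i = [] := by
        apply List.drop_eq_nil_of_le; simp [hlen]; omega
      simp [aScanL, this, scanS]
  | succ fuel ih =>
      intro i s hin
      have hi : i < sorted.reverse.length := by simp [hlen]; omega
      rw [List.drop_eq_getElem_cons hi]
      have hget : sorted.reverse[i] = getN sorted (n - i - 1) := by
        rw [List.getElem_reverse]
        rw [getN, List.getD_eq_getElem _ _ (by omega)]
        congr 1
        omega
      simp only [aScanL, scanS, hget]
      split_ifs with h
      · rw [ih (i+1) _ (by omega)]
        push_cast
        ring_nf
      · rfl

-- descending value walk = reverse of the ascending expansion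
theorem pyRange_desc (m M : Int) (hmM : m ≤ M) :
    PySem.List.pyRange M (m - 1) (-1)
      = (List.range (M - m + 1).toNat).map (fun k : Nat => M - (k:Int)) := by
  unfold PySem.List.pyRange
  rw [if_neg (by omega), if_neg (by omega), if_pos (by omega)]
  have h1 : (M - (m - 1) + - -1 - 1) / - -1 = M - m + 1 := by
    have h2 : M - (m - 1) + - -1 - 1 = M - m + 1 := by ring
    have h3 : (- -1 : Int) = 1 := by norm_num
    rw [h2, h3, Int.ediv_one]
  rw [h1]
  apply List.map_congr_left
  intro k _
  ring

theorem desc_eq_rev_asc (arr : List Int) (m M : Int) (K : Nat)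
    (hK : (K:Int) = M - m + 1) :
    (List.range K).flatMap (fun k : Nat => List.replicate (arr.count (M - k)) (M - (k:Int))) =
      (ascL arr m K).reverse := by
  unfold ascL
  rw [List.reverse_flatMap, List.range_eq_range', List.reverse_range', List.flatMap_map,
     ← List.range_eq_range']
  apply List.flatMap_congr
  intro k hk
  have hkK : k < K := List.mem_range.mp (by simpa [List.range_eq_range'] using hk)
  have hval : m + ((0 + K - 1 - k : Nat) : Int) = M - (k:Int) := by omega
  simp only [Function.comp, List.reverse_replicate]
  rw [hval]

-- max?/min? of a nonempty list is some
theorem foldl_some (f : Option Int → Int → Option Int)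
    (hf : ∀ (m x : Int), ∃ r, f (some m) x = some r) :
    ∀ (xs : List Int) (a : Int), ∃ M, List.foldl f (some a) xs = some M := by
  intro xs
  induction xs with
  | nil => intro a; exact ⟨a, rfl⟩
  | cons x xs ih =>
      intro a
      obtain ⟨r, hr⟩ := hf a x
      rw [List.foldl_cons, hr]
      exact ih r

theorem max?_isSome_of_ne_nil (l : List Int) (h : l ≠ []) : ∃ M, PySem.List.max? l id = some M := by
  obtain ⟨x, xs, rfl⟩ := List.exists_cons_of_ne_nil h
  unfold PySem.List.max?
  rw [List.foldl_cons]
  refine foldl_some _ ?_ xs x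
  intro m y
  by_cases hmy : id m < id y
  · exact ⟨y, by show (if id m < id y then some y else some m) = some y; rw [if_pos hmy]⟩
  · exact ⟨m, by show (if id m < id y then some y else some m) = some m; rw [if_neg hmy]⟩

theorem min?_isSome_of_ne_nil (l : List Int) (h : l ≠ []) : ∃ m, PySem.List.min? l id = some m := by
  obtain ⟨x, xs, rfl⟩ := List.exists_cons_of_ne_nil h
  unfold PySem.List.min?
  rw [List.foldl_cons]
  refine foldl_some _ ?_ xs x
  intro m y
  by_cases hmy : id y < id m
  · exact ⟨y, by show (if id y < id m then some y else some m) = some y; rw [if_pos hmy]⟩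
  · exact ⟨m, by show (if id y < id m then some y else some m) = some m; rw [if_neg hmy]⟩

-- ===== VERDICT (by name: the statement is the Claim_ definition above) =====
theorem get_max_sum2_spec : Claim_equal_get_max_sum2 := by
  unfold Claim_equal_get_max_sum2
  intro array _ hpre
  unfold Spec_get_max_sum2
  obtain ⟨M, hM⟩ := max?_isSome_of_ne_nil array hpre
  obtain ⟨m, hm⟩ := min?_isSome_of_ne_nil array hpre
  have hMub : ∀ y ∈ array, y ≤ M := fun y hy => by
    simpa using PySem.List.max?_isMax hM y hy
  have hmlb : ∀ y ∈ array, m ≤ y := fun y hy => by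
    simpa using PySem.List.min?_isMin hm y hy
  have hmM : m ≤ M := hmlb M (PySem.List.max?_mem hM)
  have hb : ∀ x ∈ array, 0 ≤ x - m ∧ (x - m).toNat < (M - m + 1).toNat := by
    intro x hx
    have h1 := hMub x hx
    have h2 := hmlb x hx
    omega
  have hb' : ∀ x ∈ array, 0 ≤ x - m ∧ x - m < (((M - m + 1).toNat : Nat) : Int) := by
    intro x hx
    have h1 := hMub x hx
    have h2 := hmlb x hx
    omega
  set K := (M - m + 1).toNat with hKdef
  set n := array.length with hndef
  have hK1 : 1 ≤ K := by omega
  have hKc : (K:Int) = M - m + 1 := by omega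
  -- the histogram
  set count1 := array.foldl (aCountStepL m) (List.replicate K (0:Int)) with hc1def
  have hlen1 : count1.length = K := by rw [hc1def, hist_len]; simp
  have hget1 : ∀ j, j < K → getN count1 j = (array.count (m + (j:Int)) : Int) := by
    intro j hj
    rw [hc1def, hist m array _ (by
        intro x hx
        have := hb x hx
        simpa using this) j (by simpa using hj)]
    rw [getN_replicate _ _ (by simpa using hj)]
    ring
  -- the prefix sums
  set count2 := (List.range' 1 (count1.length - 1)).foldl aPrefixStepL count1 with hc2def
  have hlen2 : count2.length = K := by rw [hc2def, prefix_len, hlen1]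
  have hget2 : ∀ j, j < K → getN count2 j = S array m (j+1) := by
    intro j hj
    rw [hc2def, hlen1]
    exact prefix_aux (fun j => (array.count (m + (j:Int)) : Int)) (fun j => S array m (j+1))
      (by
        intro j hj1
        obtain ⟨j', rfl⟩ : ∃ j', j = j' + 1 := ⟨j - 1, by omega⟩
        simp only [Nat.add_sub_cancel]
        rfl)
      (K - 1) 1 count1 (le_refl _) (by omega)
      (by
        intro j hj0
        have hj00 : j = 0 := by omega
        subst hj00
        rw [hget1 0 (by omega)]
        simp [S])
      (fun j _ hjlen => hget1 j (by omega))
      j (by omega)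
  have hSK : S array m K = (n:Int) := S_len array m K hb'
  -- the scatter pass
  set stA := array.reverse.foldl (aScatterStepL m) (List.replicate n (0:Int), count2) with hstdef
  have hInv0 : ScatInv array m K n [] (List.replicate n (0:Int), count2) := by
    refine ⟨by simp, by simpa using hlen2, ?_, ?_⟩
    · intro j hj
      simpa using hget2 j hj
    · intro p j hpn hj hge hlt
      exfalso
      simp at hge
      omega
  have hFin : ScatInv array m K n array.reverse stA := by
    have h := scatter_aux array m K n hb (le_of_eq hSK) array.reverse [] _ (by simp) hInv0
    simpa [hstdef] using h
  have hlenA : stA.1.length = n := hFin.1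
  have hascn : ((ascL array m K).length : Int) = (n:Int) := by rw [asc_len, hSK]
  have hsorted_eq : stA.1 = ascL array m K := by
    apply List.ext_getElem (by omega)
    intro p h1 h2
    have hpn : p < n := by omega
    obtain ⟨j, hj, hge, hlt⟩ := S_cover array m K p (by rw [hSK]; exact_mod_cast hpn)
    have hAg : getN stA.1 p = m + j := by
      refine hFin.2.2.2 p j hpn hj ?_ hlt
      have hcr : (array.reverse.count (m + (j:Int))) = array.count (m + (j:Int)) :=
        List.count_reverse
      rw [hcr]
      have hs : S array m (j+1) = S array m j + (array.count (m + (j:Int)) : Int) := rfl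
      omega
    have hBg : getN (ascL array m K) p = m + j := asc_get array m K j hj p hge hlt
    rw [getN, List.getD_eq_getElem _ _ h1] at hAg
    rw [getN, List.getD_eq_getElem _ _ h2] at hBg
    rw [hAg, hBg]
  -- A's value
  have hAeq : get_max_sum2 array = aScanL stA.1 n n 0 0 := by
    simp only [get_max_sum2, hM, hm, Option.getD_some]
    rw [← hKdef, ← hndef]
    set cnt1A := array.foldl (aCountStep m) (Array.replicate K (0:Int)) with hc1A
    set cnt2A := (List.range' 1 (cnt1A.size - 1)).foldl aPrefixStep cnt1A with hc2A
    set FA := array.reverse.foldl (aScatterStep m) (Array.replicate n (0:Int), cnt2A) with hFA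
    rw [aScan_toList]
    have h1 : cnt1A.toList = count1 := by
      rw [hc1A, countFold_toList, Array.toList_replicate, ← hc1def]
    have hsz : cnt1A.size = K := by rw [← Array.length_toList, h1, hlen1]
    have h2 : cnt2A.toList = count2 := by
      rw [hc2A, hsz, prefixFold_toList, h1, hc2def, hlen1]
    have h3 : (FA.1.toList, FA.2.toList) = stA := by
      rw [hFA, scatterFold_toList]
      simp only [Array.toList_replicate, h2]
      rw [hstdef]
    have h4 : FA.1.toList = stA.1 := congrArg Prod.fst h3
    rw [h4]
  have hAs : aScanL stA.1 n n 0 0 = (scanS (stA.1.reverse.drop 0) (0, ((0:Nat):Int))).1.1 :=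
    aScanL_eq stA.1 n hlenA n 0 0 (by omega)
  -- B's value
  have hBval : get_max_sum2_alt array = (scanS ((ascL array m K).reverse) (0, 0)).1.1 := by
    have hbc : bCountStep = aCountStep := rfl
    simp only [get_max_sum2_alt, hM, hm, Option.getD_some]
    rw [← hKdef, hbc]
    set ctA := array.foldl (aCountStep m) (Array.replicate K (0:Int)) with hctA
    have h1 : ctA.toList = count1 := by
      rw [hctA, countFold_toList, Array.toList_replicate, ← hc1def]
    rw [bOuter_toList, h1, bOuterL_eq, pyRange_desc m M hmM, ← hKdef, List.flatMap_map]
    have hcongr :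
        (List.range K).flatMap
            (fun k : Nat => List.replicate ((getN count1 ((M - (k:Int)) - m).toNat).toNat) (M - (k:Int)))
          = (List.range K).flatMap
            (fun k : Nat => List.replicate (array.count (M - (k:Int))) (M - (k:Int))) := by
      apply List.flatMap_congr
      intro k hk
      have hkK : k < K := List.mem_range.mp hk
      have hidx : ((M - (k:Int)) - m).toNat < K := by omega
      have hval : m + ((((M - (k:Int)) - m).toNat : Nat) : Int) = M - (k:Int) := by omega
      rw [hget1 _ hidx, hval]
      simp
    rw [hcongr, desc_eq_rev_asc array m M K hKc]
  rw [hAeq, hAs, List.drop_zero, hsorted_eq, hBval]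
  norm_num
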